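-- pv_equiv track=rewrite | github.com/marcogoedert/pucrs-ss-a1-vigenere | src/vigenere.py | join_subarrays
-- ===== SOURCE A (Python) =====
-- def join_subarrays(subarrays):
--     # Get the maximum length of the subarrays
--     max_length = max([len(arr) for arr in subarrays])
--     clear_text = []
--
--     for i in range(max_length):
--         for j in range(len(subarrays)):
--             if i < len(subarrays[j]):
--                 clear_text += subarrays[j][i]
--     return "".join(clear_text)
-- ===== SOURCE B (Python) =====
-- def join_subarrays(subarrays):
--     # Strip one "row" of leading elements at a time instead of double index loops.
--     cols = list(subarrays)
--     parts = []
--     while any(cols):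
--         parts.append("".join(col[0] for col in cols if col))
--         cols = [col[1:] for col in cols]
--     return "".join(parts)
-- ===== Notes on version B (the rewrite author's own statement) =====
-- stated objective: idiomatic
-- what changed: Replaced the double index loop (range over max length, inner range over subarray indices with bounds tests) by a transpose-style while loop that emits the string of current heads and strips one leading element off every subarray per iteration.
-- outside the precondition, e.g. on join_subarrays([]): A raises ValueError, B returns ''
import Mathlib
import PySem

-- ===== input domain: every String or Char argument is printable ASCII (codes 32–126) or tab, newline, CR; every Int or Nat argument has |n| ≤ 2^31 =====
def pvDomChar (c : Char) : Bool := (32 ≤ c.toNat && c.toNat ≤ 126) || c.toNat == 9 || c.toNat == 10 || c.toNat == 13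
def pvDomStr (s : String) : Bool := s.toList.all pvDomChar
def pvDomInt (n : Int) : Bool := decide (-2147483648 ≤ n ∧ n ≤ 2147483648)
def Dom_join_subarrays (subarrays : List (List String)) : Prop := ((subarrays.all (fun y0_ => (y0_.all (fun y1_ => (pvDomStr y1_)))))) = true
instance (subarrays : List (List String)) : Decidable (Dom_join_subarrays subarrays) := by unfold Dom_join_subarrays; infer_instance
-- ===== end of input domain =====

-- B replaces A's double index loop by stripping one leading "row" off all subarrays per
-- iteration (idiomatic column-wise transpose); return values agree wherever A returns.

-- ===== PORT A =====
-- clear_text is Python's list of single characters ('+=' on a string extends by its chars);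
-- "".join(clear_text) is String.ofList of those chars.
def join_subarrays (subarrays : List (List String)) : String :=
  let max_length : Int :=
    (PySem.List.max? (subarrays.map (fun arr => (arr.length : Int))) (fun y => y)).getD 0
  let clear_text : List Char :=
    (PySem.List.pyRange 0 max_length 1).foldl (fun acc i =>
      (PySem.List.pyRange 0 (subarrays.length : Int) 1).foldl (fun acc2 j =>
        if i < (((PySem.List.pyGetD subarrays j []).length : Int)) then
          acc2 ++ ((PySem.List.pyGet? (PySem.List.pyGetD subarrays j []) i).getD "").toList
        else acc2) acc) []
  String.ofList clear_text

-- ===== PORT B =====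
-- termination helper for the while-loop: stripping a head somewhere shrinks the total length
theorem pvAltSumLe (cols : List (List String)) :
    ((cols.map (List.drop 1)).map List.length).sum ≤ (cols.map List.length).sum := by
  induction cols with
  | nil => simp
  | cons c t ih => simp only [List.map_cons, List.sum_cons, List.length_drop]; omega

theorem pvAltSumLt (cols : List (List String))
    (h : cols.any (fun c => !c.isEmpty) = true) :
    ((cols.map (List.drop 1)).map List.length).sum < (cols.map List.length).sum := by
  induction cols with
  | nil => simp at h
  | cons c t ih =>
    simp only [List.any_cons, Bool.or_eq_true] at h
    simp only [List.map_cons, List.sum_cons, List.length_drop]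
    rcases h with h | h
    · have hc : c ≠ [] := by
        intro hc; rw [hc] at h; simp at h
      have h1 : 1 ≤ c.length := by
        cases c with
        | nil => exact absurd rfl hc
        | cons x xs => simp
      have := pvAltSumLe t
      omega
    · have := ih h; omega

-- the while loop: emit the string of current heads, drop one element from every column
def altLoop (cols : List (List String)) (parts : List String) : List String :=
  if h : cols.any (fun c => !c.isEmpty) = true then
    altLoop (cols.map (List.drop 1)) (parts ++ [PySem.Str.join "" (cols.filterMap List.head?)])
  else parts
termination_by (cols.map List.length).sum
decreasing_by simpa [Function.comp_def, List.drop_one] using pvAltSumLt cols h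

def join_subarrays_alt (subarrays : List (List String)) : String :=
  PySem.Str.join "" (altLoop subarrays [])

-- ===== PRECONDITION & SPEC =====
-- Pre_ excludes only the empty outer list, on which A's max([]) raises ValueError
-- (B returns "" there).
def Pre_join_subarrays (subarrays : List (List String)) : Prop := subarrays ≠ []
instance (subarrays : List (List String)) : Decidable (Pre_join_subarrays subarrays) := by
  unfold Pre_join_subarrays; infer_instance
def pvWitness_join_subarrays : List (List String) := [["ab", "c"], ["d"]]

def Spec_join_subarrays (subarrays : List (List String)) (out : String) : Prop :=
  out = join_subarrays_alt subarrays
instance (subarrays : List (List String)) (out : String) :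
    Decidable (Spec_join_subarrays subarrays out) := by
  unfold Spec_join_subarrays; infer_instance

-- ===== CLAIM (what is proved, stated in full; the proofs are below) =====
def Claim_equal_join_subarrays : Prop := ∀ (subarrays : List (List String)),
  Dom_join_subarrays subarrays → Pre_join_subarrays subarrays →
  Spec_join_subarrays subarrays (join_subarrays subarrays)
-- ===== LEMMAS AND PROOFS =====

-- the common specification: row i is the concatenation of the i-th element of each subarray
def pvM (subs : List (List String)) : Nat := (subs.map List.length).foldr max 0

def pvRowS (subs : List (List String)) (i : Nat) : String :=
  PySem.Str.join "" (subs.filterMap (fun c => getElem? c i))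

theorem pvJoinNil (xs : List (List Char)) : PySem.Chars.join [] xs = xs.flatten := by
  induction xs with
  | nil => rfl
  | cons a t ih =>
    cases t with
    | nil => simp [PySem.Chars.join, List.intercalate]
    | cons b u => simp_all [PySem.Chars.join_cons_cons]

theorem pvToListRowS (subs : List (List String)) (i : Nat) :
    (pvRowS subs i).toList = ((subs.filterMap (fun c => getElem? c i)).map String.toList).flatten := by
  unfold pvRowS
  rw [PySem.Str.toList_join]
  simpa using pvJoinNil _

-- pvM facts -------------------------------------------------------------
theorem pvM_cons (c : List String) (t : List (List String)) :
    pvM (c :: t) = max c.length (pvM t) := rfl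

theorem pvLen_le_M (subs : List (List String)) {c : List String} (h : c ∈ subs) :
    c.length ≤ pvM subs := by
  induction subs with
  | nil => simp at h
  | cons a t ih =>
    rw [List.mem_cons] at h
    rcases h with rfl | h
    · rw [pvM_cons]; omega
    · have := ih h; rw [pvM_cons]; omega

theorem pvM_drop (subs : List (List String)) :
    pvM (subs.map (List.drop 1)) = pvM subs - 1 := by
  induction subs with
  | nil => rfl
  | cons c t ih =>
    rw [List.map_cons, pvM_cons, pvM_cons, ih, List.length_drop]
    omega

theorem pvM_pos_of_any (subs : List (List String))
    (h : subs.any (fun c => !c.isEmpty) = true) : 1 ≤ pvM subs := by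
  rw [List.any_eq_true] at h
  obtain ⟨c, hc, hne⟩ := h
  have h1 : 1 ≤ c.length := by
    cases c with
    | nil => simp at hne
    | cons x xs => simp
  have := pvLen_le_M subs hc
  omega

theorem pvM_eq_zero (subs : List (List String))
    (h : subs.any (fun c => !c.isEmpty) = false) : pvM subs = 0 := by
  induction subs with
  | nil => rfl
  | cons a t ih =>
    simp only [List.any_cons, Bool.or_eq_false_iff] at h
    have ha : a = [] := by
      cases a with
      | nil => rfl
      | cons x xs => simp at h
    rw [pvM_cons, ih h.2, ha]
    simp

theorem pvAny_of_M_pos (subs : List (List String)) (h : 1 ≤ pvM subs) :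
    subs.any (fun c => !c.isEmpty) = true := by
  by_contra hno
  rw [Bool.not_eq_true] at hno
  have := pvM_eq_zero subs hno
  omega

-- max? of the mapped lengths is pvM -------------------------------------
theorem pvFoldrSwap (l : List Nat) (x a : Nat) :
    l.foldr max (max x a) = max a (l.foldr max x) := by
  induction l with
  | nil => simp [Nat.max_comm]
  | cons b v ih => simp only [List.foldr_cons, ih]; omega

theorem pvFoldrInit (l : List Nat) (x : Nat) :
    l.foldr max x = max x (l.foldr max 0) := by
  induction l with
  | nil => simp
  | cons b v ih => simp only [List.foldr_cons, ih]; omega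

theorem pvFoldlMaxCast (t : List (List String)) (x : Nat) :
    (t.map (fun c => (c.length : Int))).foldl max (x : Int)
      = (((t.map List.length).foldr max x : Nat) : Int) := by
  induction t generalizing x with
  | nil => simp
  | cons a u ih =>
    have h := ih (max x a.length)
    push_cast at h
    rw [List.map_cons, List.foldl_cons, h, List.map_cons, List.foldr_cons,
      pvFoldrSwap (u.map List.length) x a.length]

theorem pvMax?_eq (subs : List (List String)) (h : subs ≠ []) :
    PySem.List.max? (subs.map (fun arr => (arr.length : Int))) (fun y => y)
      = some ((pvM subs : Nat) : Int) := by
  cases subs with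
  | nil => exact absurd rfl h
  | cons a t =>
    rw [List.map_cons, PySem.List.max?_id_cons, pvFoldlMaxCast t a.length]
    unfold pvM
    rw [List.map_cons, List.foldr_cons, pvFoldrInit (t.map List.length) a.length]

-- A-side characterisation ------------------------------------------------
theorem pvInnerFold (subs : List (List String)) (i : Nat) (acc : List Char) :
    subs.foldl (fun acc2 arr =>
        if (i : Int) < (arr.length : Int) then
          acc2 ++ ((PySem.List.pyGet? arr (i : Int)).getD "").toList
        else acc2) acc
      = acc ++ ((subs.filterMap (fun c => getElem? c i)).map String.toList).flatten := by
  induction subs generalizing acc with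
  | nil => simp
  | cons c t ih =>
    rw [List.foldl_cons]
    by_cases hlt : i < c.length
    · have h1 : ((i : Int)) < ((c.length : Int)) := by exact_mod_cast hlt
      rw [if_pos h1, ih]
      simp [List.getElem?_eq_getElem hlt]
    · have h1 : ¬ ((i : Int)) < ((c.length : Int)) := by exact_mod_cast hlt
      have h2 : getElem? c i = none := List.getElem?_eq_none_iff.mpr (by omega)
      rw [if_neg h1, ih]
      simp [h2]

theorem pvA_char (subs : List (List String)) (h : subs ≠ []) :
    join_subarrays subs = String.ofList
      (((List.range (pvM subs)).map
        (fun i => ((subs.filterMap (fun c => getElem? c i)).map String.toList).flatten)).flatten) := by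
  unfold join_subarrays
  rw [pvMax?_eq subs h]
  simp only [Option.getD_some]
  rw [PySem.List.pyRange_zero_natCast (pvM subs), List.foldl_map]
  congr 1
  have hbody : ∀ (acc : List Char) (k : Nat),
      (PySem.List.pyRange 0 (subs.length : Int) 1).foldl (fun acc2 j =>
        if (k : Int) < (((PySem.List.pyGetD subs j []).length : Int)) then
          acc2 ++ ((PySem.List.pyGet? (PySem.List.pyGetD subs j []) (k : Int)).getD "").toList
        else acc2) acc
      = acc ++ ((subs.filterMap (fun c => getElem? c k)).map String.toList).flatten := by
    intro acc k
    rw [PySem.List.foldl_pyRange_zero_pyGetD' subs []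
      (fun acc2 arr =>
        if (k : Int) < ((arr.length : Int)) then
          acc2 ++ ((PySem.List.pyGet? arr (k : Int)).getD "").toList
        else acc2) acc]
    exact pvInnerFold subs k acc
  have key : ∀ (n : Nat) (acc : List Char),
      (List.range n).foldl (fun acc k =>
        (PySem.List.pyRange 0 (subs.length : Int) 1).foldl (fun acc2 j =>
          if ((k : Nat) : Int) < (((PySem.List.pyGetD subs j []).length : Int)) then
            acc2 ++ ((PySem.List.pyGet? (PySem.List.pyGetD subs j []) ((k : Nat) : Int)).getD "").toList
          else acc2) acc) acc
      = acc ++ ((List.range n).map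
          (fun i => ((subs.filterMap (fun c => getElem? c i)).map String.toList).flatten)).flatten := by
    intro n
    induction n with
    | zero => simp
    | succ m ihm =>
      intro acc
      rw [List.range_succ, List.foldl_append, ihm]
      simp only [List.foldl_cons, List.foldl_nil]
      rw [hbody]
      simp [List.map_append]
  simpa using key (pvM subs) []

-- B-side characterisation ------------------------------------------------
theorem pvAltAccAux : ∀ (n : Nat) (cols : List (List String)) (parts : List String),
    (cols.map List.length).sum = n → altLoop cols parts = parts ++ altLoop cols [] := by
  intro n
  induction n using Nat.strong_induction_on with
  | _ n ih =>
    intro cols parts hn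
    by_cases h : cols.any (fun c => !c.isEmpty) = true
    · rw [altLoop]
      rw [dif_pos h]
      rw [ih _ (hn ▸ pvAltSumLt cols h) _ _ rfl]
      conv_rhs => rw [altLoop]
      rw [dif_pos h]
      conv_rhs => rw [ih _ (hn ▸ pvAltSumLt cols h) _ _ rfl]
      simp
    · rw [altLoop, dif_neg h]
      conv_rhs => rw [altLoop]
      rw [dif_neg h]
      simp

theorem pvAltAcc (cols : List (List String)) (parts : List String) :
    altLoop cols parts = parts ++ altLoop cols [] :=
  pvAltAccAux _ cols parts rfl

theorem pvAlt_eq (n : Nat) : ∀ (cols : List (List String)), pvM cols = n →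
    altLoop cols [] = (List.range n).map (pvRowS cols) := by
  induction n with
  | zero =>
    intro cols hM
    rw [altLoop, dif_neg]
    · simp
    · intro hany
      have := pvM_pos_of_any cols hany
      omega
  | succ m ih =>
    intro cols hM
    have hany : cols.any (fun c => !c.isEmpty) = true := by
      apply pvAny_of_M_pos; omega
    rw [altLoop, dif_pos hany, pvAltAcc,
      ih (cols.map (List.drop 1)) (by rw [pvM_drop, hM]; omega),
      List.range_succ_eq_map]
    simp only [List.nil_append, List.singleton_append, List.map_cons, List.map_map]
    congr 1
    · unfold pvRowS
      congr 1
      apply List.filterMap_congr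
      intro c _
      rw [List.head?_eq_getElem?]
    · apply List.map_congr_left
      intro k _
      unfold pvRowS
      simp only [Function.comp_apply]
      congr 1
      rw [List.filterMap_map]
      apply List.filterMap_congr
      intro c _
      simp only [Function.comp_apply]
      rw [List.getElem?_drop, Nat.add_comm]

theorem pvB_char (subs : List (List String)) :
    join_subarrays_alt subs = PySem.Str.join "" ((List.range (pvM subs)).map (pvRowS subs)) := by
  unfold join_subarrays_alt
  rw [pvAlt_eq (pvM subs) subs rfl]

-- ===== VERDICT (by name: the statement is the Claim_ definition above) =====
theorem join_subarrays_spec : Claim_equal_join_subarrays := by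
  unfold Claim_equal_join_subarrays
  intro subs _ hpre
  unfold Spec_join_subarrays
  rw [pvB_char, pvA_char subs hpre]
  apply String.toList_inj.mp
  rw [PySem.Str.toList_join]
  simp only [String.toList_ofList]
  rw [show ("".toList) = ([] : List Char) from rfl, pvJoinNil]
  rw [List.map_map]
  congr 1
  apply List.map_congr_left
  intro i _
  exact (pvToListRowS subs i).symm
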